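-- pv_equiv track=rewrite | github.com/22ai-sarthak4381-a11y/nl-to-sql | dashboard.py | quick_interpret
-- ===== SOURCE A (Python) =====
-- def quick_interpret(query):
--     query = query.lower()
--
--     # Simple metric detection
--     metric = "General Analytics"
--     if any(word in query for word in ["sales", "revenue", "amount", "sold"]): metric = "Total Sales"
--     elif "count" in query or "number of" in query: metric = "Record Count"
--     elif "average" in query or "avg" in query: metric = "Average Value"
--     elif "rating" in query: metric = "Product Ratings"
--
--     # Advanced grouping detection
--     group_by = None
--     if "by gender" in query: group_by = "Gender"
--     elif "by category" in query: group_by = "Purchase Category"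
--     elif "by location" in query or "by city" in query: group_by = "Location"
--     elif "by channel" in query: group_by = "Purchase Channel"
--     elif "by month" in query: group_by = "Month"
--     elif "by occupation" in query: group_by = "Occupation"
--
--     # Legacy fallback if no explicit "by" used
--     if not group_by:
--         if "month" in query: group_by = "Month"
--         elif "category" in query: group_by = "Category"
--         elif "location" in query or "city" in query: group_by = "Location"
--         elif "gender" in query: group_by = "Gender"
--         elif "channel" in query: group_by = "Purchase Channel"
--         else: group_by = "Overall"
--
--
--     # Simple filter detection (basic extraction)
--     filters = []
--     months = ["january", "february", "march", "april", "may", "june", "july", "august", "september", "october", "november", "december"]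
--     for m in months:
--         if m in query or m[:3] in query:
--             filters.append(m.title())
--
--     if "bangalore" in query: filters.append("Bangalore")
--     if "mumbai" in query: filters.append("Mumbai")
--     if "male" in query and "female" not in query: filters.append("Male")
--     if "female" in query: filters.append("Female")
--
--     return {
--         "metric": metric,
--         "group_by": group_by,
--         "filter": ", ".join(filters) if filters else "None"
--     }
-- ===== SOURCE B (Python) =====
-- # Single left-to-right scan of the query builds a set of all matched needles once;
-- # metric/group_by/filters are then pure membership lookups against that index.
-- _METRIC_RULES = [
--     (["sales", "revenue", "amount", "sold"], "Total Sales"),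
--     (["count", "number of"], "Record Count"),
--     (["average", "avg"], "Average Value"),
--     (["rating"], "Product Ratings"),
-- ]
-- # explicit "by X" tier first, then the bare-word fallback tier
-- _GROUP_RULES = [
--     (["by gender"], "Gender"),
--     (["by category"], "Purchase Category"),
--     (["by location", "by city"], "Location"),
--     (["by channel"], "Purchase Channel"),
--     (["by month"], "Month"),
--     (["by occupation"], "Occupation"),
--     (["month"], "Month"),
--     (["category"], "Category"),
--     (["location", "city"], "Location"),
--     (["gender"], "Gender"),
--     (["channel"], "Purchase Channel"),
-- ]
-- _MONTHS = [
--     ("january", "January"), ("february", "February"), ("march", "March"),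
--     ("april", "April"), ("may", "May"), ("june", "June"), ("july", "July"),
--     ("august", "August"), ("september", "September"), ("october", "October"),
--     ("november", "November"), ("december", "December"),
-- ]
-- _NEEDLES = (
--     [kw for kws, _ in _METRIC_RULES + _GROUP_RULES for kw in kws]
--     + [m for m, _ in _MONTHS] + [m[:3] for m, _ in _MONTHS]
--     + ["bangalore", "mumbai", "male", "female"]
-- )
--
--
-- def quick_interpret(query):
--     q = query.lower()
--     # one scan of the text: at every position, record each needle that starts there
--     found = set()
--     for i in range(len(q) + 1):
--         for kw in _NEEDLES:
--             if q.startswith(kw, i):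
--                 found.add(kw)
--     hit = found.__contains__
--     metric = next((lab for kws, lab in _METRIC_RULES if any(hit(w) for w in kws)),
--                   "General Analytics")
--     group_by = next((lab for kws, lab in _GROUP_RULES if any(hit(w) for w in kws)),
--                     "Overall")
--     filters = [lab for m, lab in _MONTHS if hit(m) or hit(m[:3])]
--     filters += [lab for kw, lab in (("bangalore", "Bangalore"), ("mumbai", "Mumbai")) if hit(kw)]
--     if hit("male") and not hit("female"):
--         filters.append("Male")
--     if hit("female"):
--         filters.append("Female")
--     return {
--         "metric": metric,
--         "group_by": group_by,
--         "filter": ", ".join(filters) if filters else "None",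
--     }
-- ===== Notes on version B (the rewrite author's own statement) =====
-- stated objective: alternative
-- what changed: Instead of testing each keyword against the query with separate substring cascades, B makes one positional scan of the query that builds a set index of every needle starting at each position, and then metric/group_by/filters are computed purely by membership lookups in that index (first-match rule tables for metric/group_by, pair tables for filters).
import Mathlib
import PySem

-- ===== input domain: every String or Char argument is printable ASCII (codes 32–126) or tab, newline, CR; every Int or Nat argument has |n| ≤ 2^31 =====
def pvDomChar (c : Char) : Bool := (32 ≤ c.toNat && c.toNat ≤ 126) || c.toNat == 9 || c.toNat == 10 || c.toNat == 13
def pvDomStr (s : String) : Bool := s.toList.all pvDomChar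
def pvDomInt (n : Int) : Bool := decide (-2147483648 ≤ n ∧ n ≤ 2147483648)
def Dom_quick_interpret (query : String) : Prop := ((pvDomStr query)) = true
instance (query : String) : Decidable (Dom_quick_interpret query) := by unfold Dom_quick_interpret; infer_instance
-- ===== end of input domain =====

-- B replaces A's per-keyword `in` cascades by ONE positional scan of the query that builds
-- a set of every matched needle, after which metric/group_by/filters are pure membership
-- lookups; same behaviour, alternative algorithm.

-- ===== PORT A =====

-- hand port of str.title (no PySem primitive); exact on the ASCII inputs it is applied to
-- (the literal month names), where Python's cased characters are exactly the letters
def pyTitleGo : List Char → Bool → List Char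
  | [], _ => []
  | c :: cs, prevCased =>
    if PySem.Chars.isalpha c then
      (if prevCased then PySem.Chars.lowerChar c else PySem.Chars.upperChar c) :: pyTitleGo cs true
    else c :: pyTitleGo cs false

def pyTitle (s : String) : String := String.ofList (pyTitleGo s.toList false)

def quick_interpret (query : String) : List (String × String) :=
  let q := PySem.Str.lower query
  -- metric: initial assignment + if/elif chain, as a value chain
  let metric :=
    if ["sales", "revenue", "amount", "sold"].any (fun w => PySem.Str.isIn w q) then "Total Sales"
    else if PySem.Str.isIn "count" q || PySem.Str.isIn "number of" q then "Record Count"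
    else if PySem.Str.isIn "average" q || PySem.Str.isIn "avg" q then "Average Value"
    else if PySem.Str.isIn "rating" q then "Product Ratings"
    else "General Analytics"
  -- group_by: Optional set by the explicit-"by" chain, then the fallback chain
  let group_by? : Option String :=
    if PySem.Str.isIn "by gender" q then some "Gender"
    else if PySem.Str.isIn "by category" q then some "Purchase Category"
    else if PySem.Str.isIn "by location" q || PySem.Str.isIn "by city" q then some "Location"
    else if PySem.Str.isIn "by channel" q then some "Purchase Channel"
    else if PySem.Str.isIn "by month" q then some "Month"
    else if PySem.Str.isIn "by occupation" q then some "Occupation"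
    else none
  let group_by : String :=
    match group_by? with
    | some g => g
    | none =>
      if PySem.Str.isIn "month" q then "Month"
      else if PySem.Str.isIn "category" q then "Category"
      else if PySem.Str.isIn "location" q || PySem.Str.isIn "city" q then "Location"
      else if PySem.Str.isIn "gender" q then "Gender"
      else if PySem.Str.isIn "channel" q then "Purchase Channel"
      else "Overall"
  let months : List String := ["january", "february", "march", "april", "may", "june", "july",
    "august", "september", "october", "november", "december"]
  let filters := months.foldl (fun acc m =>
    if PySem.Str.isIn m q || PySem.Str.isIn (String.ofList (PySem.List.slice m.toList none (some 3))) q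
    then acc ++ [pyTitle m] else acc) []
  let filters := if PySem.Str.isIn "bangalore" q then filters ++ ["Bangalore"] else filters
  let filters := if PySem.Str.isIn "mumbai" q then filters ++ ["Mumbai"] else filters
  let filters := if PySem.Str.isIn "male" q && !PySem.Str.isIn "female" q then filters ++ ["Male"] else filters
  let filters := if PySem.Str.isIn "female" q then filters ++ ["Female"] else filters
  [("metric", metric), ("group_by", group_by),
   ("filter", if filters.isEmpty then "None" else PySem.Str.join ", " filters)]

-- ===== PORT B =====

def metricRules : List (List String × String) :=
  [(["sales", "revenue", "amount", "sold"], "Total Sales"),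
   (["count", "number of"], "Record Count"),
   (["average", "avg"], "Average Value"),
   (["rating"], "Product Ratings")]

def groupRules : List (List String × String) :=
  [(["by gender"], "Gender"),
   (["by category"], "Purchase Category"),
   (["by location", "by city"], "Location"),
   (["by channel"], "Purchase Channel"),
   (["by month"], "Month"),
   (["by occupation"], "Occupation"),
   (["month"], "Month"),
   (["category"], "Category"),
   (["location", "city"], "Location"),
   (["gender"], "Gender"),
   (["channel"], "Purchase Channel")]

def monthTable : List (String × String) :=
  [("january", "January"), ("february", "February"), ("march", "March"),
   ("april", "April"), ("may", "May"), ("june", "June"), ("july", "July"),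
   ("august", "August"), ("september", "September"), ("october", "October"),
   ("november", "November"), ("december", "December")]

def cityTable : List (String × String) := [("bangalore", "Bangalore"), ("mumbai", "Mumbai")]

-- Source B's _NEEDLES: every keyword any later lookup will ask about
def needleList : List String :=
  ["sales", "revenue", "amount", "sold", "count", "number of", "average", "avg", "rating",
   "by gender", "by category", "by location", "by city", "by channel", "by month",
   "by occupation", "month", "category", "location", "city", "gender", "channel",
   "january", "february", "march", "april", "may", "june", "july", "august",
   "september", "october", "november", "december",
   "jan", "feb", "mar", "apr", "may", "jun", "jul", "aug", "sep", "oct", "nov", "dec",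
   "bangalore", "mumbai", "male", "female"]

-- Source B's scan loop: for i in range(len(q)+1): for kw in _NEEDLES: if q.startswith(kw, i): found.add(kw)
def foundOf (qL : List Char) : PySem.Set String :=
  (List.range (qL.length + 1)).foldl
    (fun s i => needleList.foldl
      (fun s kw => if PySem.Chars.startswith (qL.drop i) kw.toList then PySem.Set.add s kw else s) s)
    PySem.Set.empty

def firstMatch (hit : String → Bool) (rules : List (List String × String)) (dflt : String) : String :=
  match rules.find? (fun r => r.1.any hit) with
  | some r => r.2
  | none => dflt

def quick_interpret_alt (query : String) : List (String × String) :=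
  let q := PySem.Str.lower query
  let found := foundOf q.toList
  let hit := fun w => PySem.Set.contains found w
  let metric := firstMatch hit metricRules "General Analytics"
  let group_by := firstMatch hit groupRules "Overall"
  let filters :=
    (monthTable.filter (fun p =>
      hit p.1 || hit (String.ofList (PySem.List.slice p.1.toList none (some 3))))).map Prod.snd
    ++ (cityTable.filter (fun p => hit p.1)).map Prod.snd
    ++ (if hit "male" && !hit "female" then ["Male"] else [])
    ++ (if hit "female" then ["Female"] else [])
  [("metric", metric), ("group_by", group_by),
   ("filter", if filters.isEmpty then "None" else PySem.Str.join ", " filters)]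

-- ===== PRECONDITION & SPEC =====
def Spec_quick_interpret (query : String) (out : List (String × String)) : Prop := out = quick_interpret_alt query
instance (query : String) (out : List (String × String)) : Decidable (Spec_quick_interpret query out) := by unfold Spec_quick_interpret; infer_instance

-- ===== CLAIM (what is proved, stated in full; the proofs are below) =====
def Claim_equal_quick_interpret : Prop := ∀ (query : String), Dom_quick_interpret query → Spec_quick_interpret query (quick_interpret query)

-- ===== LEMMAS AND PROOFS =====

theorem append_ite {α : Type} (c : Bool) (a x : List α) :
    (if c then a ++ x else a) = a ++ (if c then x else []) := by
  cases c <;> simp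

-- membership in Source B's inner fold (add each matching needle)
theorem mem_foldl_addIf (p : String → Bool) (x : String) :
    ∀ (l : List String) (s : List String),
    (x ∈ l.foldl (fun s kw => if p kw then PySem.Set.add s kw else s) s) ↔
      x ∈ s ∨ (x ∈ l ∧ p x = true) := by
  intro l
  induction l with
  | nil => intro s; simp
  | cons a l ih =>
    intro s
    rw [List.foldl_cons, ih]
    by_cases hxa : x = a
    · subst hxa
      by_cases ha : p x = true <;> simp [ha, PySem.Set.mem_add]
    · by_cases ha : p a = true <;> simp [ha, PySem.Set.mem_add, hxa]

-- membership in Source B's full scan (outer fold over positions)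
theorem mem_foldl_scan (qL : List Char) (x : String) :
    ∀ (l : List Nat) (s : List String),
    (x ∈ l.foldl
        (fun s i => needleList.foldl
          (fun s kw => if PySem.Chars.startswith (qL.drop i) kw.toList then PySem.Set.add s kw else s) s)
        s) ↔
      x ∈ s ∨ ∃ i ∈ l, x ∈ needleList ∧ PySem.Chars.startswith (qL.drop i) x.toList = true := by
  intro l
  induction l with
  | nil => intro s; simp
  | cons a l ih =>
    intro s
    rw [List.foldl_cons, ih, mem_foldl_addIf]
    simp only [List.mem_cons]
    constructor
    · rintro ((h | ⟨h1, h2⟩) | ⟨i, hi, h⟩)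
      · exact Or.inl h
      · exact Or.inr ⟨a, Or.inl rfl, h1, h2⟩
      · exact Or.inr ⟨i, Or.inr hi, h⟩
    · rintro (h | ⟨i, (rfl | hi), h⟩)
      · exact Or.inl (Or.inl h)
      · exact Or.inl (Or.inr h)
      · exact Or.inr ⟨i, hi, h⟩

theorem mem_foundOf (qL : List Char) (x : String) :
    x ∈ foundOf qL ↔
      ∃ i ∈ List.range (qL.length + 1), x ∈ needleList ∧
        PySem.Chars.startswith (qL.drop i) x.toList = true := by
  unfold foundOf
  rw [mem_foldl_scan]
  simp [PySem.Set.empty]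

theorem needle_nonempty : ∀ w ∈ needleList, w.toList ≠ [] := by decide

-- the heart: a membership lookup in the scan's index equals Python's `w in q`
theorem hit_eq (q w : String) (hw : w ∈ needleList) :
    PySem.Set.contains (foundOf q.toList) w = PySem.Str.isIn w q := by
  have hne := needle_nonempty w hw
  rw [Bool.eq_iff_iff, PySem.Set.contains_iff, mem_foundOf, PySem.Str.isIn_eq,
    ← PySem.Chars.exists_prefix_drop_iff_isIn]
  constructor
  · rintro ⟨i, _, _, h⟩
    exact ⟨i, (PySem.Chars.startswith_iff _ _).mp h⟩
  · rintro ⟨j, hj⟩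
    have hjlt : j < q.toList.length := by
      by_contra hge
      push Not at hge
      rw [List.drop_eq_nil_of_le hge] at hj
      exact hne (List.prefix_nil.mp hj)
    exact ⟨j, List.mem_range.mpr (by omega), hw, (PySem.Chars.startswith_iff _ _).mpr hj⟩

theorem firstMatch_nil (hit : String → Bool) (dflt : String) : firstMatch hit [] dflt = dflt := rfl

theorem firstMatch_cons (hit : String → Bool) (ks : List String) (lab : String)
    (rest : List (List String × String)) (dflt : String) :
    firstMatch hit ((ks, lab) :: rest) dflt =
      if ks.any hit then lab else firstMatch hit rest dflt := by
  unfold firstMatch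
  cases h : ks.any hit <;> simp only [List.find?_cons] <;> simp [h]

theorem any_congr_mem (l : List String) (p q : String → Bool) (h : ∀ x ∈ l, p x = q x) :
    l.any p = l.any q := by
  induction l with
  | nil => rfl
  | cons a t ih =>
    simp [List.any_cons, h a (List.mem_cons_self), ih (fun x hx => h x (List.mem_cons_of_mem _ hx))]

theorem firstMatch_congr (h1 h2 : String → Bool) (dflt : String) :
    ∀ (rules : List (List String × String)),
    (∀ r ∈ rules, ∀ w ∈ r.1, h1 w = h2 w) →
    firstMatch h1 rules dflt = firstMatch h2 rules dflt := by
  intro rules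
  induction rules with
  | nil => intro _; rfl
  | cons r rest ih =>
    intro h
    obtain ⟨ks, lab⟩ := r
    rw [firstMatch_cons, firstMatch_cons,
      any_congr_mem _ _ _ (fun w hw => h (ks, lab) List.mem_cons_self w hw),
      ih (fun r hr w hw => h r (List.mem_cons_of_mem _ hr) w hw)]

theorem metric_eq (q : String) :
    (if ["sales", "revenue", "amount", "sold"].any (fun w => PySem.Str.isIn w q) then "Total Sales"
     else if PySem.Str.isIn "count" q || PySem.Str.isIn "number of" q then "Record Count"
     else if PySem.Str.isIn "average" q || PySem.Str.isIn "avg" q then "Average Value"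
     else if PySem.Str.isIn "rating" q then "Product Ratings"
     else "General Analytics") = firstMatch (fun w => PySem.Str.isIn w q) metricRules "General Analytics" := by
  simp only [metricRules, firstMatch_cons, firstMatch_nil, List.any_cons, List.any_nil,
    Bool.or_false]

set_option maxHeartbeats 1000000 in
theorem group_eq (q : String) :
    (match
      (if PySem.Str.isIn "by gender" q then some "Gender"
       else if PySem.Str.isIn "by category" q then some "Purchase Category"
       else if PySem.Str.isIn "by location" q || PySem.Str.isIn "by city" q then some "Location"
       else if PySem.Str.isIn "by channel" q then some "Purchase Channel"
       else if PySem.Str.isIn "by month" q then some "Month"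
       else if PySem.Str.isIn "by occupation" q then some "Occupation"
       else none : Option String) with
     | some g => g
     | none =>
       if PySem.Str.isIn "month" q then "Month"
       else if PySem.Str.isIn "category" q then "Category"
       else if PySem.Str.isIn "location" q || PySem.Str.isIn "city" q then "Location"
       else if PySem.Str.isIn "gender" q then "Gender"
       else if PySem.Str.isIn "channel" q then "Purchase Channel"
       else "Overall") = firstMatch (fun w => PySem.Str.isIn w q) groupRules "Overall" := by
  simp only [groupRules, firstMatch_cons, firstMatch_nil, List.any_cons, List.any_nil,
    Bool.or_false]
  split_ifs <;> rfl

theorem filter_map_pair (f : String → String) (cond : String → Bool) :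
    ∀ (tbl : List (String × String)), (∀ p ∈ tbl, f p.1 = p.2) →
    ((tbl.map Prod.fst).filter cond).map f = (tbl.filter (fun p => cond p.1)).map Prod.snd := by
  intro tbl
  induction tbl with
  | nil => intro _; rfl
  | cons p rest ih =>
    intro h
    simp only [List.map_cons, List.filter_cons]
    by_cases hc : cond p.1
    · simp [hc, h p (List.mem_cons_self), ih (fun x hx => h x (List.mem_cons_of_mem _ hx))]
    · simp [hc, ih (fun x hx => h x (List.mem_cons_of_mem _ hx))]

theorem months_eq : (["january", "february", "march", "april", "may", "june", "july",
    "august", "september", "october", "november", "december"] : List String)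
    = monthTable.map Prod.fst := by rfl

theorem title_table : ∀ p ∈ monthTable, pyTitle p.1 = p.2 := by
  intro p hp
  fin_cases hp <;> rfl

-- ===== VERDICT (by name: the statement is the Claim_ definition above) =====
theorem quick_interpret_spec : Claim_equal_quick_interpret := by
  intro query _
  unfold Spec_quick_interpret quick_interpret quick_interpret_alt
  set q := PySem.Str.lower query with hq
  have hhit : ∀ w ∈ needleList, PySem.Set.contains (foundOf q.toList) w = PySem.Str.isIn w q :=
    fun w hw => hit_eq q w hw
  -- replace every membership lookup in B by the corresponding isIn test
  have hmetric : firstMatch (fun w => PySem.Set.contains (foundOf q.toList) w) metricRules "General Analytics"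
      = firstMatch (fun w => PySem.Str.isIn w q) metricRules "General Analytics" := by
    refine firstMatch_congr _ _ _ _ ?_
    intro r hr w hw
    fin_cases hr <;> (simp only [] at hw) <;> (first
      | exact hhit w (by fin_cases hw <;> decide))
  have hgroup : firstMatch (fun w => PySem.Set.contains (foundOf q.toList) w) groupRules "Overall"
      = firstMatch (fun w => PySem.Str.isIn w q) groupRules "Overall" := by
    refine firstMatch_congr _ _ _ _ ?_
    intro r hr w hw
    fin_cases hr <;> (simp only [] at hw) <;> (first
      | exact hhit w (by fin_cases hw <;> decide))
  have hmfilt : monthTable.filter (fun p =>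
        PySem.Set.contains (foundOf q.toList) p.1 ||
        PySem.Set.contains (foundOf q.toList) (String.ofList (PySem.List.slice p.1.toList none (some 3))))
      = monthTable.filter (fun p =>
        PySem.Str.isIn p.1 q ||
        PySem.Str.isIn (String.ofList (PySem.List.slice p.1.toList none (some 3))) q) := by
    refine List.filter_congr ?_
    intro p hp
    fin_cases hp <;> rw [hhit _ (by decide), hhit _ (by decide)]
  have hcfilt : cityTable.filter (fun p => PySem.Set.contains (foundOf q.toList) p.1)
      = cityTable.filter (fun p => PySem.Str.isIn p.1 q) := by
    refine List.filter_congr ?_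
    intro p hp
    fin_cases hp <;> rw [hhit _ (by decide)]
  simp only [hmetric, hgroup, hmfilt, hcfilt, hhit "male" (by decide), hhit "female" (by decide)]
  -- now the goal is A's cascades/folds = the isIn-based table form; prove each component
  refine congrArg₂ _ (congrArg _ (metric_eq q)) ?_
  refine congrArg₂ _ (congrArg _ (group_eq q)) ?_
  have hmonths :
      (["january", "february", "march", "april", "may", "june", "july",
        "august", "september", "october", "november", "december"] : List String).foldl
        (fun acc m =>
          if PySem.Str.isIn m q ||
             PySem.Str.isIn (String.ofList (PySem.List.slice m.toList none (some 3))) q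
          then acc ++ [pyTitle m] else acc) []
      = (monthTable.filter (fun p =>
          PySem.Str.isIn p.1 q ||
          PySem.Str.isIn (String.ofList (PySem.List.slice p.1.toList none (some 3))) q)).map Prod.snd := by
    rw [months_eq,
      PySem.List.foldl_append_if
        (fun m => PySem.Str.isIn m q ||
          PySem.Str.isIn (String.ofList (PySem.List.slice m.toList none (some 3))) q) pyTitle]
    simpa using filter_map_pair pyTitle
      (fun m => PySem.Str.isIn m q ||
        PySem.Str.isIn (String.ofList (PySem.List.slice m.toList none (some 3))) q)
      monthTable title_table
  have hcity :
      ((if PySem.Str.isIn "bangalore" q then (["Bangalore"] : List String) else []) ++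
        (if PySem.Str.isIn "mumbai" q then ["Mumbai"] else []))
      = (cityTable.filter (fun p => PySem.Str.isIn p.1 q)).map Prod.snd := by
    cases h1 : PySem.Str.isIn "bangalore" q <;> cases h2 : PySem.Str.isIn "mumbai" q <;>
      simp only [cityTable, List.filter_cons, List.filter_nil, h1, h2] <;> simp
  have hBM : ∀ M : List String,
      M ++ (if PySem.Str.isIn "bangalore" q then ["Bangalore"] else []) ++
        (if PySem.Str.isIn "mumbai" q then ["Mumbai"] else [])
      = M ++ (cityTable.filter (fun p => PySem.Str.isIn p.1 q)).map Prod.snd := by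
    intro M; rw [List.append_assoc, hcity]
  rw [append_ite, append_ite, append_ite, append_ite, hmonths, hBM]
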